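-- pv_equiv track=rewrite | github.com/alibaba/ChatLearn | chatlearn/utils/utils.py | split_index
-- ===== SOURCE A (Python) =====
-- def split_index(length, num_splits):
--     # Calculate the size of each split
--     size = length // num_splits
--     remainder = length % num_splits
--
--     # Initialize an empty list for indices
--     indices = []
--
--     # Loop over the number of splits and append indices
--     start = 0
--     end = 0
--     for _ in range(num_splits):
--         end += size
--         if remainder > 0:
--             end += 1
--             remainder -= 1
--         indices.append((start, end))
--         start = end
--
--     # Return the list of indices
--     return indices
-- ===== SOURCE B (Python) =====
-- def split_index(length, num_splits):
--     size = length // num_splits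
--     remainder = length % num_splits
--     return [(i * size + min(i, remainder), (i + 1) * size + min(i + 1, remainder))
--             for i in range(num_splits)]
-- ===== Notes on version B (the rewrite author's own statement) =====
-- stated objective: simpler
-- what changed: Replaces the sequential start/end accumulator and mutated remainder with an independent closed-form boundary i*size + min(i, remainder) computed per index in a comprehension.
import Mathlib
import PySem

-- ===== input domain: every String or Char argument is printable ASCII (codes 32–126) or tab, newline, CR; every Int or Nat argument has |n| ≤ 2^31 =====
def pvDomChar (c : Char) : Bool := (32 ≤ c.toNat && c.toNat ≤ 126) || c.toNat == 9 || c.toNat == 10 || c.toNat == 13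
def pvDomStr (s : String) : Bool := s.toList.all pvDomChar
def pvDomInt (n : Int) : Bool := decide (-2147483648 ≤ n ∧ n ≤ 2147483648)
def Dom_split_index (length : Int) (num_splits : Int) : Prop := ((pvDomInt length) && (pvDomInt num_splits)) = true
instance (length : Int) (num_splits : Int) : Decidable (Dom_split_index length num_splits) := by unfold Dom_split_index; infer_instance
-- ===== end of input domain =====

-- B replaces A's running start/end accumulator and mutated remainder with an
-- independent closed-form boundary per index (objective: simpler).


-- ===== PORT A =====
-- literal transliteration of A: fold carrying (indices, start, end, remainder)
def split_index (length : Int) (num_splits : Int) : List (Int × Int) :=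
  let size := PySem.Int.floordiv length num_splits
  let remainder := PySem.Int.mod length num_splits
  let st := (PySem.List.pyRange 0 num_splits 1).foldl
    (fun (s : List (Int × Int) × Int × Int × Int) _ =>
      let indices := s.1
      let start := s.2.1
      let e := s.2.2.1
      let rem := s.2.2.2
      let e := e + size
      let e := if rem > 0 then e + 1 else e
      let rem := if rem > 0 then rem - 1 else rem
      (indices ++ [(start, e)], e, e, rem))
    ([], 0, 0, remainder)
  st.1

-- ===== PORT B =====
-- literal transliteration of B: closed-form boundary per index, no carried state
def split_index_alt (length : Int) (num_splits : Int) : List (Int × Int) :=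
  let size := PySem.Int.floordiv length num_splits
  let remainder := PySem.Int.mod length num_splits
  (PySem.List.pyRange 0 num_splits 1).map
    (fun i => (i * size + min i remainder, (i + 1) * size + min (i + 1) remainder))

-- ===== PRECONDITION & SPEC =====
-- num_splits = 0 makes both A and B raise ZeroDivisionError at '//'
def Pre_split_index (length : Int) (num_splits : Int) : Prop := num_splits ≠ 0
instance (length : Int) (num_splits : Int) : Decidable (Pre_split_index length num_splits) := by unfold Pre_split_index; infer_instance
def pvWitness_split_index : Int × Int := (10, 3)

def Spec_split_index (length : Int) (num_splits : Int) (out : List (Int × Int)) : Prop := out = split_index_alt length num_splits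
instance (length : Int) (num_splits : Int) (out : List (Int × Int)) : Decidable (Spec_split_index length num_splits out) := by unfold Spec_split_index; infer_instance

-- ===== CLAIM (what is proved, stated in full; the proofs are below) =====
def Claim_equal_split_index : Prop := ∀ (length : Int) (num_splits : Int), Dom_split_index length num_splits → Pre_split_index length num_splits → Spec_split_index length num_splits (split_index length num_splits)

-- ===== LEMMAS AND PROOFS =====

-- the loop body of A, as a standalone step function
def pvStep (size : Int) (s : List (Int × Int) × Int × Int × Int) : List (Int × Int) × Int × Int × Int :=
  let indices := s.1
  let start := s.2.1
  let e := s.2.2.1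
  let rem := s.2.2.2
  let e := e + size
  let e := if rem > 0 then e + 1 else e
  let rem := if rem > 0 then rem - 1 else rem
  (indices ++ [(start, e)], e, e, rem)

-- closed-form boundary
def pvB (size rem0 i : Int) : Int := i * size + min i rem0

-- Invariant: folding A's step over pyRange i (i+n) starting from A's state after i steps
-- yields acc ++ the closed-form segment.
theorem pv_loop (size rem0 : Int) (h0 : 0 ≤ rem0) :
    ∀ (n : ℕ) (i : Int), 0 ≤ i → ∀ (acc : List (Int × Int)),
    (PySem.List.pyRange i (i + n) 1).foldl (fun s _ => pvStep size s)
        (acc, pvB size rem0 i, pvB size rem0 i, rem0 - min i rem0)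
      = (acc ++ (PySem.List.pyRange i (i + n) 1).map
          (fun j => (pvB size rem0 j, pvB size rem0 (j + 1))),
         pvB size rem0 (i + n), pvB size rem0 (i + n), rem0 - min (i + n) rem0) := by
  intro n
  induction n with
  | zero =>
    intro i hi acc
    simp [PySem.List.pyRange_one_eq_nil (le_refl i)]
  | succ m ih =>
    intro i hi acc
    have hlt : i < i + (m + 1 : ℕ) := by push_cast; omega
    rw [PySem.List.pyRange_one_cons hlt]
    simp only [List.foldl_cons, List.map_cons]
    have hstep : pvStep size (acc, pvB size rem0 i, pvB size rem0 i, rem0 - min i rem0)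
        = (acc ++ [(pvB size rem0 i, pvB size rem0 (i + 1))],
           pvB size rem0 (i + 1), pvB size rem0 (i + 1), rem0 - min (i + 1) rem0) := by
      unfold pvStep pvB
      by_cases hc : rem0 - min i rem0 > 0
      · have h1 : min i rem0 = i := by omega
        have h2 : min (i + 1) rem0 = i + 1 := by omega
        simp [h1, h2]; ring_nf; omega
      · have h1 : min i rem0 = rem0 := by omega
        have h2 : min (i + 1) rem0 = rem0 := by omega
        simp [h1, h2]; ring
    rw [hstep]
    have := ih (i + 1) (by omega) (acc ++ [(pvB size rem0 i, pvB size rem0 (i + 1))])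
    have harw : i + 1 + (m : Int) = i + ((m + 1 : ℕ) : Int) := by push_cast; ring
    rw [harw] at this
    rw [this]
    simp

-- ===== VERDICT (by name: the statement is the Claim_ definition above) =====
theorem split_index_spec : Claim_equal_split_index := by
  unfold Claim_equal_split_index
  intro length num_splits _ hpre
  unfold Spec_split_index split_index split_index_alt
  simp only []
  set size := PySem.Int.floordiv length num_splits with hsize
  set rem0 := PySem.Int.mod length num_splits with hrem
  by_cases hpos : 0 < num_splits
  · have h0 : 0 ≤ rem0 := by
      rw [hrem]
      exact PySem.Int.mod_nonneg length hpos
    have hn : num_splits = ((num_splits.toNat : ℕ) : Int) := by omega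
    have key := pv_loop size rem0 h0 num_splits.toNat 0 (le_refl 0) []
    simp only [zero_add] at key
    rw [← hn] at key
    have hinit : pvB size rem0 0 = 0 := by unfold pvB; simp [min_eq_left h0]
    have hr0 : rem0 - min 0 rem0 = rem0 := by simp [min_eq_left h0]
    rw [hinit, hr0] at key
    have hfold : ((PySem.List.pyRange 0 num_splits 1).foldl
        (fun (s : List (Int × Int) × Int × Int × Int) _ => pvStep size s)
        ([], 0, 0, rem0)) = _ := key
    calc ((PySem.List.pyRange 0 num_splits 1).foldl
            (fun (s : List (Int × Int) × Int × Int × Int) _ =>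
              (s.1 ++ [(s.2.1, if s.2.2.2 > 0 then s.2.2.1 + size + 1 else s.2.2.1 + size)],
               (if s.2.2.2 > 0 then s.2.2.1 + size + 1 else s.2.2.1 + size),
               (if s.2.2.2 > 0 then s.2.2.1 + size + 1 else s.2.2.1 + size),
               (if s.2.2.2 > 0 then s.2.2.2 - 1 else s.2.2.2)))
            ([], 0, 0, rem0)).1
        = ((PySem.List.pyRange 0 num_splits 1).foldl
            (fun s _ => pvStep size s) ([], 0, 0, rem0)).1 := by rfl
      _ = (PySem.List.pyRange 0 num_splits 1).map
            (fun j => (pvB size rem0 j, pvB size rem0 (j + 1))) := by rw [hfold]; simp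
      _ = (PySem.List.pyRange 0 num_splits 1).map
            (fun i => (i * size + min i rem0, (i + 1) * size + min (i + 1) rem0)) := by
          unfold pvB; rfl
  · have hne : num_splits ≠ 0 := hpre
    rw [PySem.List.pyRange_one_eq_nil (by omega : num_splits ≤ (0 : Int))]
    simp
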